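-- pv_equiv track=rewrite | github.com/Las02/ARGenesInRead | testme.py | read_is_valid
-- ===== SOURCE A (Python) =====
-- def read_is_valid(gene, read):
--     '''
--     return True if the read is covering enough of the gene,
--     else returns False
--     Running time: O(len(gene))
--     '''
--     # Various parameters
--     max_space = 1   # The maximum space in the read covering the gene
--     side_bonus = int(0.70 * len(read))   # How much of the read can be outside the gene
--     threshold_score = int(0.95 *len(read))   #The percent of the read which needs to cover the gene
--
--     # Various init
--     maxcount = 0
--     count = 0
--     exitcount = 0
--     in_kmer = False
--     len_dna = len(gene)
--
--     # Score the reads coverage of the gene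
--     for pos,value in enumerate(gene):
--
--         # Start counting the coverage at first [1] in gene
--         if value == 1: in_kmer = True
--         if in_kmer:
--             if value == 0:
--                 exitcount += 1
--             else:
--                 count += 1
--                 # If at either side position, add a bonus to the score
--                 if pos in [0, len_dna-1]:
--                     count += side_bonus
--
--             # If a better fitting coverage of the read to the gene is found, use it
--             if count > maxcount:
--                 maxcount = count
--
--             # Stop counting the coverage if there is too much spacing
--             if exitcount >= max_space:
--                 count = 0
--                 exitcount = 0
--                 in_kmer = False
--
--     return maxcount >= threshold_score
-- ===== SOURCE B (Python) =====
-- def read_is_valid(gene, read):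
--     '''
--     return True if the read is covering enough of the gene,
--     else returns False
--     '''
--     side_bonus = int(0.70 * len(read))
--     threshold_score = int(0.95 * len(read))
--     n = len(gene)
--     endpoints = {0, n - 1}
--     best = 0
--     i = 0
--     while i < n:
--         if gene[i] == 1:
--             # a scoring run: starts at a 1, extends through consecutive non-zeros
--             j = i
--             while j + 1 < n and gene[j + 1] != 0:
--                 j += 1
--             score = j - i + 1 + side_bonus * sum(1 for p in endpoints if i <= p <= j)
--             best = max(best, score)
--             i = j + 1
--         else:
--             i += 1
--     return best >= threshold_score
-- ===== Notes on version B (the rewrite author's own statement) =====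
-- stated objective: alternative
-- what changed: Replaced A's single-pass state machine (in_kmer/count/exitcount flags) by explicit segmentation of the gene into maximal runs of non-zero entries starting at a 1, scoring each run in closed form (length + side_bonus per covered endpoint of the {0, n-1} set) and taking the max.
import Mathlib
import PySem

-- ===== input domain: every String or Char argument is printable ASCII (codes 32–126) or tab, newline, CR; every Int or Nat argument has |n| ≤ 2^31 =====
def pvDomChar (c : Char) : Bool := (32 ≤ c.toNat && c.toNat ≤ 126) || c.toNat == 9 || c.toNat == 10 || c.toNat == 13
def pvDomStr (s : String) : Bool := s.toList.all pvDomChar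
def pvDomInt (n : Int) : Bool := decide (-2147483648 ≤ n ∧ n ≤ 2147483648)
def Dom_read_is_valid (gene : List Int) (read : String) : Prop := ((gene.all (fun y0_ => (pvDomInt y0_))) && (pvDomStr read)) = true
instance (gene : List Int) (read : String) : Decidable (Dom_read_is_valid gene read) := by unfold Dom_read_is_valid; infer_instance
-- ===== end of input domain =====

-- B replaces A's running state machine by explicit segmentation of the gene into
-- maximal runs of non-zero entries starting at a 1, scoring each run in closed form
-- (objective: alternative decomposition, same O(n) cost).

-- ===== PORT A =====

-- exact value of Python's int(c * n) for n ≥ 0, where c is the IEEE-754 double m/2^52: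
-- the product is rounded to 53 significant bits (round-to-nearest, ties to even), then truncated.
def pyFloatMulTrunc (m : Nat) (nn : Nat) : Int :=
  let p := m * nn
  if p = 0 then 0
  else
    let k := Nat.log2 p
    if k + 1 ≤ 53 then ((p / 2 ^ 52 : Nat) : Int)
    else
      let s := k + 1 - 53
      let q0 := p / 2 ^ s
      let r := p % 2 ^ s
      let half := 2 ^ (s - 1)
      let q := if half < r ∨ (r = half ∧ q0 % 2 = 1) then q0 + 1 else q0
      ((q * 2 ^ s / 2 ^ 52 : Nat) : Int)

-- one iteration of A's for-loop; state = (maxcount, count, exitcount, in_kmer)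
def aStep (n sb : Int) (st : Int × Int × Int × Bool) (pv : Int × Int) : Int × Int × Int × Bool :=
  let mc := st.1; let count := st.2.1; let exitc := st.2.2.1; let ink := st.2.2.2
  let pos := pv.1; let value := pv.2
  let ink := if value = 1 then true else ink
  if ink then
    let exitc := if value = 0 then exitc + 1 else exitc
    let count :=
      if value = 0 then count
      else
        let c := count + 1
        -- Python's 'pos in [0, len_dna-1]'
        if pos = 0 ∨ pos = n - 1 then c + sb else c
    let mc := if count > mc then count else mc
    if exitc ≥ (1 : Int) then (mc, 0, 0, false) else (mc, count, exitc, ink)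
  else (mc, count, exitc, ink)

def read_is_valid (gene : List Int) (read : String) : Bool :=
  let sideBonus := pyFloatMulTrunc 3152519739159347 (PySem.Str.len read).toNat   -- int(0.70*len(read))
  let thresholdScore := pyFloatMulTrunc 4278419646001971 (PySem.Str.len read).toNat -- int(0.95*len(read))
  let lenDna : Int := gene.length
  let st := (PySem.List.enumerate gene 0).foldl (aStep lenDna sideBonus) (0, 0, 0, false)
  decide (st.1 ≥ thresholdScore)

-- ===== PORT B =====

-- Source B's inner while loop: extend j while j+1 < n and gene[j+1] != 0
def bFindEnd (gene : List Int) (j : Nat) : Nat :=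
  if h : j + 1 < gene.length ∧ gene.getD (j + 1) 0 ≠ 0 then bFindEnd gene (j + 1) else j
termination_by gene.length - j
decreasing_by exact Nat.sub_lt_sub_left (Nat.lt_of_succ_lt h.1) (Nat.lt_succ_self j)

-- Source B's 'sum(1 for p in endpoints if i <= p <= j)' with endpoints = {0, n-1}
def bBonus (n : Int) (i j : Nat) : Int :=
  (PySem.Set.ofList [0, n - 1]).foldl
    (fun acc p => if (i : Int) ≤ p ∧ p ≤ (j : Int) then acc + 1 else acc) 0

theorem bFindEnd_ge (gene : List Int) (j : Nat) : j ≤ bFindEnd gene j := by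
  unfold bFindEnd
  split
  · exact le_trans (by omega) (bFindEnd_ge gene (j + 1))
  · exact le_refl j
termination_by gene.length - j
decreasing_by omega

-- Source B's outer while loop over i, carrying best
def bLoop (gene : List Int) (sb : Int) (i : Nat) (best : Int) : Int :=
  if h : i < gene.length then
    if gene.getD i 0 = 1 then
      let j := bFindEnd gene i
      let score := (j : Int) - (i : Int) + 1 + sb * bBonus gene.length i j
      bLoop gene sb (j + 1) (max best score)
    else bLoop gene sb (i + 1) best
  else best
termination_by gene.length - i
decreasing_by
  · exact Nat.sub_lt_sub_left h (Nat.lt_succ_of_le (bFindEnd_ge gene i))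
  · exact Nat.sub_lt_sub_left h (Nat.lt_succ_self i)

def read_is_valid_alt (gene : List Int) (read : String) : Bool :=
  let sideBonus := pyFloatMulTrunc 3152519739159347 (PySem.Str.len read).toNat
  let thresholdScore := pyFloatMulTrunc 4278419646001971 (PySem.Str.len read).toNat
  decide (bLoop gene sideBonus 0 0 ≥ thresholdScore)

-- ===== PRECONDITION & SPEC =====
def Spec_read_is_valid (gene : List Int) (read : String) (out : Bool) : Prop := out = read_is_valid_alt gene read
instance (gene : List Int) (read : String) (out : Bool) : Decidable (Spec_read_is_valid gene read out) := by unfold Spec_read_is_valid; infer_instance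

-- ===== CLAIM (what is proved, stated in full; the proofs are below) =====
def Claim_equal_read_is_valid : Prop := ∀ (gene : List Int) (read : String), Dom_read_is_valid gene read → Spec_read_is_valid gene read (read_is_valid gene read)

-- ===== LEMMAS AND PROOFS =====

-- A's fold over the enumerated list, written as a recursion on the suffix with its position
def aSuf (n sb : Int) : List Int → Int → (Int × Int × Int × Bool) → Int
  | [], _, st => st.1
  | v :: rest, pos, st => aSuf n sb rest (pos + 1) (aStep n sb st (pos, v))

theorem aSuf_eq_foldl (n sb : Int) (l : List Int) (pos : Int) (st : Int × Int × Int × Bool) :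
    aSuf n sb l pos st = ((PySem.List.enumerate l pos).foldl (aStep n sb) st).1 := by
  induction l generalizing pos st with
  | nil => simp [aSuf, PySem.List.enumerate_nil]
  | cons v rest ih => simp [aSuf, PySem.List.enumerate_cons, ih]

-- side-bonus indicator at position p
def ind (n : Int) (p : Nat) : Int := if (p : Int) = 0 ∨ (p : Int) = n - 1 then 1 else 0

theorem bBonus_closed (n : Int) (i j : Nat) :
    bBonus n i j =
      (if (i : Int) ≤ 0 ∧ (0 : Int) ≤ (j : Int) then 1 else 0) +
      (if ¬ (n - 1 = 0) ∧ (i : Int) ≤ n - 1 ∧ n - 1 ≤ (j : Int) then 1 else 0) := by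
  by_cases h : n - 1 = 0
  · simp [bBonus, PySem.Set.ofList, PySem.Set.add, PySem.Set.contains, h]
  · simp only [bBonus, PySem.Set.ofList, PySem.Set.add, PySem.Set.contains, List.foldl]
    simp [h]
    split_ifs <;> omega

theorem bBonus_nonneg (n : Int) (i j : Nat) : 0 ≤ bBonus n i j := by
  rw [bBonus_closed]; split_ifs <;> omega

theorem bBonus_rec (n : Int) (i j : Nat) (hij : i ≤ j) :
    bBonus n i j = ind n i + bBonus n (i + 1) j := by
  rw [bBonus_closed, bBonus_closed]
  unfold ind
  split_ifs <;> push_cast <;> omega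

theorem bBonus_self (n : Int) (i : Nat) : bBonus n i i = ind n i := by
  rw [bBonus_closed]; unfold ind; split_ifs <;> push_cast <;> omega

-- one non-zero step of A's loop, in kmer
theorem aStep_nonzero (n sb mc c : Int) (i : Nat) (v : Int) (hv : v ≠ 0) :
    aStep n sb (mc, c, 0, true) ((i : Int), v) =
      (max mc (c + 1 + sb * ind n i), c + 1 + sb * ind n i, 0, true) := by
  simp only [aStep, ind]
  have h1 : (if v = 1 then true else true) = true := by split <;> rfl
  simp only [h1, if_true, if_neg hv]
  split_ifs <;> simp_all <;> omega

-- a zero step of A's loop while in kmer resets the state (maxcount already ≥ count)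
theorem aStep_zero (n sb mc c : Int) (pos : Int) (hmc : c ≤ mc) :
    aStep n sb (mc, c, 0, true) (pos, 0) = (mc, 0, 0, false) := by
  simp only [aStep]
  norm_num
  omega

-- a step of A's loop out of kmer, on a value ≠ 1, does nothing
theorem aStep_skip (n sb mc : Int) (pos v : Int) (hv : v ≠ 1) :
    aStep n sb (mc, 0, 0, false) (pos, v) = (mc, 0, 0, false) := by
  simp [aStep, hv]


theorem drop_cons (l : List Int) (i : Nat) (h : i < l.length) :
    l.drop i = l.getD i 0 :: l.drop (i + 1) := by
  rw [List.drop_eq_getElem_cons h, List.getD_eq_getElem l 0 h]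

theorem bFindEnd_lt (gene : List Int) (i : Nat) (h : i < gene.length) :
    bFindEnd gene i < gene.length := by
  unfold bFindEnd
  split
  · exact bFindEnd_lt gene (i + 1) (by omega)
  · exact h
termination_by gene.length - i
decreasing_by omega

theorem bFindEnd_stop (gene : List Int) (i : Nat) :
    bFindEnd gene i + 1 < gene.length → gene.getD (bFindEnd gene i + 1) 0 = 0 := by
  unfold bFindEnd
  split
  · exact bFindEnd_stop gene (i + 1)
  · intro hlt
    rename_i hcond
    by_contra hne
    exact hcond ⟨hlt, hne⟩
termination_by gene.length - i
decreasing_by omega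

theorem bFindEnd_nonzero (gene : List Int) (i : Nat) :
    ∀ k, i < k → k ≤ bFindEnd gene i → gene.getD k 0 ≠ 0 := by
  unfold bFindEnd
  split
  · intro k hk1 hk2
    rename_i hcond
    by_cases hk : k = i + 1
    · subst hk; exact hcond.2
    · exact bFindEnd_nonzero gene (i + 1) k (by omega) hk2
  · intro k hk1 hk2
    omega
termination_by gene.length - i
decreasing_by omega

theorem pyFloatMulTrunc_nonneg (m nn : Nat) : 0 ≤ pyFloatMulTrunc m nn := by
  unfold pyFloatMulTrunc
  dsimp only
  split
  · exact le_refl 0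
  · split
    · exact Int.natCast_nonneg _
    · exact Int.natCast_nonneg _

-- A across one maximal scoring run gene[i..i+d] (all non-zero, terminated by the
-- end of the gene or by a 0 at i+d+1): the final maxcount absorbs the whole run score.
theorem runLemma (gene : List Int) (sb : Int) (hsb : 0 ≤ sb) :
    ∀ (d i : Nat) (mc c : Int),
      i + d < gene.length →
      (∀ k, k ≤ d → gene.getD (i + k) 0 ≠ 0) →
      (i + d + 1 < gene.length → gene.getD (i + d + 1) 0 = 0) →
      aSuf (gene.length : Int) sb (gene.drop i) (i : Int) (mc, c, 0, true) =
        (if i + d + 1 < gene.length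
         then aSuf (gene.length : Int) sb (gene.drop (i + d + 2)) ((i + d + 2 : Nat) : Int)
                (max mc (c + (d + 1 : Int) + sb * bBonus (gene.length : Int) i (i + d)), 0, 0, false)
         else max mc (c + (d + 1 : Int) + sb * bBonus (gene.length : Int) i (i + d))) := by
  intro d
  induction d with
  | zero =>
    intro i mc c hlen hall hstop
    simp only [Nat.add_zero] at *
    have hv : gene.getD i 0 ≠ 0 := by simpa using hall 0 (le_refl 0)
    rw [drop_cons gene i (by omega)]
    simp only [aSuf]
    rw [aStep_nonzero _ _ _ _ i _ hv]
    rw [bBonus_self]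
    simp only [Nat.cast_zero, zero_add]
    by_cases h2 : i + 1 < gene.length
    · rw [if_pos h2]
      have h0 : gene.getD (i + 1) 0 = 0 := hstop h2
      rw [drop_cons gene (i + 1) (by omega)]
      simp only [aSuf, h0]
      rw [aStep_zero _ _ _ _ _ (le_max_right _ _)]
      rw [show ((i + 2 : Nat) : Int) = (i : Int) + 1 + 1 by push_cast; ring]
    · rw [if_neg h2]
      rw [List.drop_eq_nil_of_le (show gene.length ≤ i + 1 by omega)]
      simp only [aSuf]
  | succ d ih =>
    intro i mc c hlen hall hstop
    have hv : gene.getD i 0 ≠ 0 := by simpa using hall 0 (by omega)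
    rw [drop_cons gene i (by omega)]
    simp only [aSuf]
    rw [aStep_nonzero _ _ _ _ i _ hv]
    have hih := ih (i + 1) (max mc (c + 1 + sb * ind (gene.length : Int) i))
      (c + 1 + sb * ind (gene.length : Int) i)
      (by omega)
      (fun k hk => by
        have := hall (k + 1) (by omega)
        simpa [show i + 1 + k = i + (k + 1) by omega] using this)
      (by
        intro hlt
        have := hstop (by omega)
        simpa [show i + 1 + d + 1 = i + (d + 1) + 1 by omega] using this)
    rw [show ((i : Int) + 1) = ((i + 1 : Nat) : Int) by push_cast; ring]
    rw [hih]
    simp only [show i + (d + 1) = i + 1 + d from by omega]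
    have hnn : 0 ≤ sb * bBonus (gene.length : Int) (i + 1) (i + 1 + d) :=
      mul_nonneg hsb (bBonus_nonneg _ _ _)
    have hd0 : (0 : Int) ≤ (d : Int) := Int.natCast_nonneg d
    have hmax : max (max mc (c + 1 + sb * ind (gene.length : Int) i))
        (c + 1 + sb * ind (gene.length : Int) i + ((d : Int) + 1) +
          sb * bBonus (gene.length : Int) (i + 1) (i + 1 + d)) =
        max mc (c + ((d : Int) + 1 + 1) + sb * bBonus (gene.length : Int) i (i + 1 + d)) := by
      rw [max_assoc]
      have hinner : max (c + 1 + sb * ind (gene.length : Int) i)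
          (c + 1 + sb * ind (gene.length : Int) i + ((d : Int) + 1) +
            sb * bBonus (gene.length : Int) (i + 1) (i + 1 + d)) =
          c + 1 + sb * ind (gene.length : Int) i + ((d : Int) + 1) +
            sb * bBonus (gene.length : Int) (i + 1) (i + 1 + d) :=
        max_eq_right (by linarith)
      rw [hinner]
      conv_rhs => rw [bBonus_rec (gene.length : Int) i (i + 1 + d) (by omega)]
      congr 1
      ring
    rw [hmax]
    push_cast
    rfl


-- A from a clean state at index i equals B's outer loop from i
theorem mainLemma (gene : List Int) (sb : Int) (hsb : 0 ≤ sb) :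
    ∀ (fuel i : Nat) (mc : Int), gene.length - i ≤ fuel →
      aSuf (gene.length : Int) sb (gene.drop i) (i : Int) (mc, 0, 0, false) = bLoop gene sb i mc := by
  intro fuel
  induction fuel with
  | zero =>
    intro i mc hf
    rw [List.drop_eq_nil_of_le (by omega)]
    rw [bLoop, dif_neg (by omega)]
    rfl
  | succ fuel ih =>
    intro i mc hf
    by_cases hi : i < gene.length
    · by_cases h1 : gene.getD i 0 = 1
      · have hj := bFindEnd_ge gene i
        have hjlt := bFindEnd_lt gene i hi
        set j := bFindEnd gene i with hjdef
        have hrun := runLemma gene sb hsb (j - i) i mc 0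
          (by omega)
          (fun k hk => by
            by_cases hk0 : k = 0
            · subst hk0; simp only [Nat.add_zero, h1]; norm_num
            · exact bFindEnd_nonzero gene i (i + k) (by omega) (by omega))
          (by
            intro hlt
            have := bFindEnd_stop gene i (by omega)
            simpa [show i + (j - i) + 1 = j + 1 by omega] using this)
        rw [show i + (j - i) = j by omega] at hrun
        rw [show (((j - i : Nat)) : Int) = (j : Int) - (i : Int) by omega] at hrun
        rw [show (0 : Int) + ((j : Int) - (i : Int) + 1) + sb * bBonus (gene.length : Int) i j
              = (j : Int) - (i : Int) + 1 + sb * bBonus (gene.length : Int) i j by ring] at hrun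
        have hstart : aSuf (gene.length : Int) sb (gene.drop i) (i : Int) (mc, 0, 0, false)
            = aSuf (gene.length : Int) sb (gene.drop i) (i : Int) (mc, 0, 0, true) := by
          rw [drop_cons gene i (by omega)]
          simp only [aSuf]
          congr 1
          rw [h1]
          simp [aStep]
        rw [bLoop, dif_pos hi, if_pos h1, ← hjdef]
        dsimp only
        rw [bLoop, hstart, hrun]
        by_cases h2 : j + 1 < gene.length
        · rw [if_pos h2, dif_pos h2]
          have h0 : gene.getD (j + 1) 0 = 0 := bFindEnd_stop gene i (by omega)
          rw [if_neg (by rw [h0]; norm_num)]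
          rw [show j + 1 + 1 = j + 2 by omega]
          exact ih (j + 2) _ (by omega)
        · rw [if_neg h2, dif_neg h2]
      · rw [drop_cons gene i (by omega)]
        simp only [aSuf]
        rw [aStep_skip _ _ _ _ _ h1]
        rw [show ((i : Int) + 1) = ((i + 1 : Nat) : Int) by push_cast; ring]
        rw [ih (i + 1) mc (by omega)]
        conv_rhs => rw [bLoop]
        rw [dif_pos hi, if_neg h1]
    · rw [List.drop_eq_nil_of_le (by omega)]
      rw [bLoop, dif_neg hi]
      rfl

-- ===== VERDICT (by name: the statement is the Claim_ definition above) =====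
theorem read_is_valid_spec : Claim_equal_read_is_valid := by
  intro gene read _
  unfold Spec_read_is_valid read_is_valid read_is_valid_alt
  dsimp only
  have hsb : 0 ≤ pyFloatMulTrunc 3152519739159347 (PySem.Str.len read).toNat :=
    pyFloatMulTrunc_nonneg _ _
  have h := mainLemma gene _ hsb gene.length 0 0 (by omega)
  rw [List.drop_zero, Nat.cast_zero] at h
  rw [← aSuf_eq_foldl, h]
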